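-- pv_equiv track=rewrite | github.com/pkitslaar/PyChristmasTrees | inject2021_prepare.py | ascii_to_int_columns
-- ===== SOURCE A (Python) =====
-- def ascii_to_int_columns(ascii_txt, num_rows=8, num_cols=0):
--     if not num_cols:
--       num_cols = num_rows
--     grid = [list(row[:num_cols]) for row in ascii_txt.splitlines()]
--     grid_T = [[' ']*num_rows for _ in range(num_cols)]
--     for y in range(num_rows):
--         for x in range(num_cols):
--             grid_T[x][y]=grid[y][x]
--     return [int(f"0b{''.join(row)}".replace(' ','0'),2) for row in grid_T]
-- ===== SOURCE B (Python) =====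
-- def ascii_to_int_columns(ascii_txt, num_rows=8, num_cols=0):
--     if not num_cols:
--         num_cols = num_rows
--     lines = ascii_txt.splitlines()
--     result = []
--     for x in range(num_cols):
--         value = 0
--         for y in range(num_rows):
--             value = 2 * value + (1 if lines[y][x] == '1' else 0)
--         result.append(value)
--     return result
-- ===== Notes on version B (the rewrite author's own statement) =====
-- stated objective: simpler
-- what changed: B removes A's explicit transposed matrix and its double index-assignment loop, walking each column once and accumulating the integer arithmetically (value = 2*value + bit) instead of building a bit-string and parsing it with int in base 2.
-- outside the precondition, e.g. on ascii_to_int_columns('1\n_\n1', 3, 1): A returns [3], B returns [5]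
import Mathlib
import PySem

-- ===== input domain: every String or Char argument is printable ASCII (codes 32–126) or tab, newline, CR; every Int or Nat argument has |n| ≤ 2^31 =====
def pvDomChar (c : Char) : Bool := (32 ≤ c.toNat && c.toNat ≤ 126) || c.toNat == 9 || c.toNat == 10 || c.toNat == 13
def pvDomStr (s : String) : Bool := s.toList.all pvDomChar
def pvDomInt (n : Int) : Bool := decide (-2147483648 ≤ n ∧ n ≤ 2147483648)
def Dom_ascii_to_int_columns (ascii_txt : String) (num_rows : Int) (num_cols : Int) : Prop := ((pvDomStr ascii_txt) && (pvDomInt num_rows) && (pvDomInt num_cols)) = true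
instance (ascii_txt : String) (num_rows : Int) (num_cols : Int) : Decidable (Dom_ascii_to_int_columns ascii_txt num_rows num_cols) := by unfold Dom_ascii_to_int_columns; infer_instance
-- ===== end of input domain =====

-- B drops A's explicit transposed matrix and its index-assignment double loop: it walks each column once,
-- accumulating the integer arithmetically (value = 2*value + bit) instead of building a bit-string for int(.,2);
-- objective: simpler (same asymptotic cost).

-- ===== PORT A =====
-- hand port of Python's int(s, 2): exact for every string this program can pass to it under
-- Pre_ascii_to_int_columns, namely the two-character base-2 prefix followed by a nonempty run of
-- binary digit characters (none = ValueError)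
def pvParseBin0b? (cs : List Char) : Option Int :=
  match cs with
  | '0' :: 'b' :: ds =>
      if ds ≠ [] ∧ ds.all (fun c => c == '0' || c == '1') then
        some (ds.foldl (fun v c => 2 * v + (if c = '1' then 1 else 0)) 0)
      else none
  | _ => none

def ascii_to_int_columns (ascii_txt : String) (num_rows : Int) (num_cols : Int) : List Int :=
  let nc : Int := if num_cols == 0 then num_rows else num_cols
  let grid : List (List Char) :=
    (PySem.Chars.splitlines ascii_txt.toList).map (fun row => PySem.List.slice row none (some nc))
  let gridT0 : List (List Char) := List.replicate nc.toNat (List.replicate num_rows.toNat ' ')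
  let gridT : List (List Char) :=
    (PySem.List.pyRange 0 num_rows 1).foldl (fun gT y =>
      (PySem.List.pyRange 0 nc 1).foldl (fun gT x =>
        PySem.List.pySetD gT x
          (PySem.List.pySetD (PySem.List.pyGetD gT x []) y
            (PySem.List.pyGetD (PySem.List.pyGetD grid y []) x ' '))) gT) gridT0
  gridT.map (fun row =>
    (pvParseBin0b?
      (PySem.Chars.replace ('0' :: 'b' :: PySem.Chars.join [] (row.map (fun c => [c]))) [' '] ['0'])).getD 0)

-- ===== PORT B =====
def ascii_to_int_columns_alt (ascii_txt : String) (num_rows : Int) (num_cols : Int) : List Int :=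
  let nc : Int := if num_cols == 0 then num_rows else num_cols
  let lines := PySem.Chars.splitlines ascii_txt.toList
  (PySem.List.pyRange 0 nc 1).foldl (fun result x =>
    result ++
      [(PySem.List.pyRange 0 num_rows 1).foldl (fun value y =>
          2 * value +
            (if PySem.List.pyGetD (PySem.List.pyGetD lines y []) x ' ' == '1' then 1 else 0)) 0]) []

-- ===== PRECONDITION & SPEC =====
-- Pre_ = the inputs on which the Python A returns normally (enough lines, long enough rows, only
-- binary digits and blanks in the used block); it also excludes blocks containing an underscore, on
-- some of which int(.,2) still returns a value (underscore accepted as a digit separator) — an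
-- accident of Python's int-literal syntax nobody would specify; B counts an underscore as an unset
-- bit there (see claim cites).
def Pre_ascii_to_int_columns (ascii_txt : String) (num_rows : Int) (num_cols : Int) : Prop :=
  (let nc : Int := if num_cols = 0 then num_rows else num_cols
   let lines := PySem.Chars.splitlines ascii_txt.toList
   decide (nc ≤ 0) ||
     (decide (1 ≤ num_rows) && decide (num_rows ≤ (lines.length : Int)) &&
       (lines.take num_rows.toNat).all (fun row =>
         decide (nc ≤ (row.length : Int)) &&
           (row.take nc.toNat).all (fun c => c == '0' || c == '1' || c == ' ')))) = true
instance (ascii_txt : String) (num_rows : Int) (num_cols : Int) : Decidable (Pre_ascii_to_int_columns ascii_txt num_rows num_cols) := by unfold Pre_ascii_to_int_columns; infer_instance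

def pvWitness_ascii_to_int_columns : String × Int × Int := ("1 \n01", 2, 2)

def Spec_ascii_to_int_columns (ascii_txt : String) (num_rows : Int) (num_cols : Int) (out : List Int) : Prop := out = ascii_to_int_columns_alt ascii_txt num_rows num_cols
instance (ascii_txt : String) (num_rows : Int) (num_cols : Int) (out : List Int) : Decidable (Spec_ascii_to_int_columns ascii_txt num_rows num_cols out) := by unfold Spec_ascii_to_int_columns; infer_instance

-- ===== CLAIM (what is proved, stated in full; the proofs are below) =====
def Claim_equal_ascii_to_int_columns : Prop := ∀ (ascii_txt : String) (num_rows : Int) (num_cols : Int), Dom_ascii_to_int_columns ascii_txt num_rows num_cols → Pre_ascii_to_int_columns ascii_txt num_rows num_cols → Spec_ascii_to_int_columns ascii_txt num_rows num_cols (ascii_to_int_columns ascii_txt num_rows num_cols)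

-- ===== LEMMAS AND PROOFS =====

theorem pv_map_range_set {α : Type} (g : Nat → α) (n j : Nat) (v : α) :
    ((List.range n).map g).set j v
      = (List.range n).map (fun x => if x = j then v else g x) := by
  apply List.ext_getElem
  · simp
  · intro i h1 h2
    simp only [List.getElem_set, List.getElem_map, List.getElem_range]
    by_cases h : i = j
    · simp [h]
    · simp [h]; exact fun h' => absurd h'.symm h

theorem pv_pySetD_natCast {α : Type} (xs : List α) (n : Nat) (v : α) (h : n < xs.length) :
    PySem.List.pySetD xs (n : Int) v = xs.set n v := by
  simp [PySem.List.pySetD, PySem.List.pySet?, PySem.List.pyIdx?, h]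

theorem pv_pyGetD_map_range {α : Type} (g : Nat → α) (n j : Nat) (d : α) (hj : j < n) :
    PySem.List.pyGetD ((List.range n).map g) (j : Int) d = g j := by
  simp [PySem.List.pyGetD_natCast, List.getD, hj]

theorem pv_replace_go (l : List Char) : ∀ (fuel : Nat) (acc : List Char), l.length ≤ fuel →
    PySem.Chars.replace.go [' '] ['0'] fuel l acc
      = acc.reverse ++ l.map (fun c => if c = ' ' then '0' else c) := by
  induction l with
  | nil => intro fuel acc _; cases fuel <;> simp [PySem.Chars.replace.go]
  | cons c t ih =>
    intro fuel acc h
    simp only [List.length_cons] at h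
    cases fuel with
    | zero => omega
    | succ m =>
      rw [PySem.Chars.replace.go]
      by_cases hc : c = ' '
      · simp [hc, List.isPrefixOf, ih m _ (by omega)]
      · simp [List.isPrefixOf, hc, ih m _ (by omega)]
        exact fun h' => absurd h'.symm hc

theorem pv_replace_space_zero (cs : List Char) :
    PySem.Chars.replace cs [' '] ['0'] = cs.map (fun c => if c = ' ' then '0' else c) := by
  simp [PySem.Chars.replace, pv_replace_go cs cs.length [] le_rfl]

-- inner loop (one y = k): writes f x into row k of every column
theorem pv_inner_loop (nc : Nat) (k : Nat) (f : Int → Char) (g : Nat → List Char)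
    (hg : ∀ x, k < (g x).length) (j : Nat) (hj : j ≤ nc) :
    (PySem.List.pyRange 0 (j : Int) 1).foldl (fun gT x =>
        PySem.List.pySetD gT x
          (PySem.List.pySetD (PySem.List.pyGetD gT x []) (k : Int) (f x))) ((List.range nc).map g)
      = (List.range nc).map (fun (x : Nat) => if x < j then (g x).set k (f ((x : Nat) : Int)) else g x) := by
  induction j with
  | zero =>
    rw [show PySem.List.pyRange 0 ((0:Nat):Int) 1 = [] from PySem.List.pyRange_one_eq_nil (by norm_num)]
    simp
  | succ m ih =>
    have hm : m < nc := by omega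
    have hcast : ((m + 1 : Nat) : Int) = (m : Int) + 1 := by push_cast; ring
    rw [hcast, PySem.List.pyRange_one_succ_right (by positivity), List.foldl_append,
        ih (by omega)]
    simp only [List.foldl_cons, List.foldl_nil]
    rw [pv_pyGetD_map_range _ nc m _ hm]
    simp only [if_neg (lt_irrefl m)]
    rw [pv_pySetD_natCast _ k _ (hg m), pv_pySetD_natCast _ m _ (by simp [hm]),
        pv_map_range_set _ nc m]
    apply List.map_congr_left
    intro x hx
    by_cases h1 : x = m
    · simp [h1]
    · by_cases h2 : x < m <;> simp [h1, h2] <;> omega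

-- outer loop: the transpose characterization
theorem pv_outer_loop (nc nr : Nat) (f : Int → Int → Char) (k : Nat) (hk : k ≤ nr) :
    (PySem.List.pyRange 0 (k : Int) 1).foldl (fun gT y =>
        (PySem.List.pyRange 0 (nc : Int) 1).foldl (fun gT x =>
          PySem.List.pySetD gT x
            (PySem.List.pySetD (PySem.List.pyGetD gT x []) y (f y x))) gT)
      (List.replicate nc (List.replicate nr ' '))
      = (List.range nc).map (fun (x : Nat) =>
          (List.range nr).map (fun (y : Nat) => if y < k then f ((y : Nat) : Int) ((x : Nat) : Int) else ' ')) := by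
  induction k with
  | zero =>
    rw [show PySem.List.pyRange 0 ((0:Nat):Int) 1 = [] from PySem.List.pyRange_one_eq_nil (by norm_num)]
    simp [List.map_const']
  | succ m ih =>
    have hm : m < nr := by omega
    have hcast : ((m + 1 : Nat) : Int) = (m : Int) + 1 := by push_cast; ring
    rw [hcast, PySem.List.pyRange_one_succ_right (by positivity), List.foldl_append,
        ih (by omega)]
    simp only [List.foldl_cons, List.foldl_nil]
    rw [pv_inner_loop nc m (fun x => f (m : Int) x)
          (fun (x : Nat) => (List.range nr).map (fun (y : Nat) => if y < m then f ((y : Nat) : Int) ((x : Nat) : Int) else ' '))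
          (by intro x; simp [hm]) nc le_rfl]
    apply List.map_congr_left
    intro x hx
    simp only [List.mem_range] at hx
    simp only [if_pos hx]
    rw [pv_map_range_set _ nr m]
    apply List.map_congr_left
    intro y hy
    by_cases h1 : y = m
    · simp [h1]
    · by_cases h2 : y < m <;> simp [h1, h2] <;> omega


theorem pv_foldl_const {α β : Type} (l : List β) (init : α) :
    l.foldl (fun a _ => a) init = init := by
  induction l generalizing init <;> simp_all

theorem pv_main_core (lines : List (List Char)) (nr nc : Int)
    (hpre : nc ≤ 0 ∨ (1 ≤ nr ∧ nr ≤ (lines.length : Int) ∧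
      ∀ row ∈ lines.take nr.toNat,
        nc ≤ (row.length : Int) ∧ ∀ c ∈ row.take nc.toNat, c = '0' ∨ c = '1' ∨ c = ' ')) :
    ((PySem.List.pyRange 0 nr 1).foldl (fun gT y =>
        (PySem.List.pyRange 0 nc 1).foldl (fun gT x =>
          PySem.List.pySetD gT x
            (PySem.List.pySetD (PySem.List.pyGetD gT x []) y
              (PySem.List.pyGetD
                (PySem.List.pyGetD (lines.map (fun row => PySem.List.slice row none (some nc))) y []) x ' '))) gT)
      (List.replicate nc.toNat (List.replicate nr.toNat ' '))).map (fun row =>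
        (pvParseBin0b?
          (PySem.Chars.replace ('0' :: 'b' :: PySem.Chars.join [] (row.map (fun c => [c]))) [' '] ['0'])).getD 0)
    = (PySem.List.pyRange 0 nc 1).foldl (fun result x =>
        result ++
          [(PySem.List.pyRange 0 nr 1).foldl (fun value y =>
              2 * value +
                (if PySem.List.pyGetD (PySem.List.pyGetD lines y []) x ' ' == '1' then 1 else 0)) 0]) [] := by
  by_cases hnc : nc ≤ 0
  · rw [PySem.List.pyRange_one_eq_nil hnc]
    simp only [List.foldl_nil, pv_foldl_const]
    have : nc.toNat = 0 := by omega
    simp [this]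
  · replace hnc : 0 < nc := lt_of_not_ge hnc
    obtain ⟨hnr, hlen, hrows⟩ := hpre.resolve_left (by omega)
    obtain ⟨N, rfl⟩ : ∃ N : Nat, nr = (N : Int) := ⟨nr.toNat, (Int.toNat_of_nonneg (by omega)).symm⟩
    obtain ⟨C, rfl⟩ : ∃ C : Nat, nc = (C : Int) := ⟨nc.toNat, (Int.toNat_of_nonneg (by omega)).symm⟩
    simp only [Int.toNat_natCast] at hrows ⊢
    have hN : 1 ≤ N := by exact_mod_cast hnr
    have hC : 1 ≤ C := by exact_mod_cast hnc
    have hlen' : N ≤ lines.length := by exact_mod_cast hlen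
    -- the character at (y, x), its range facts
    have hcell : ∀ y < N, ∀ x < C,
        PySem.List.pyGetD
            (PySem.List.pyGetD (lines.map (fun row => PySem.List.slice row none (some (C : Int)))) (y : Int) [])
            (x : Int) ' '
          = PySem.List.pyGetD (PySem.List.pyGetD lines (y : Int) []) (x : Int) ' '
        ∧ (PySem.List.pyGetD (PySem.List.pyGetD lines (y : Int) []) (x : Int) ' ' = '0'
            ∨ PySem.List.pyGetD (PySem.List.pyGetD lines (y : Int) []) (x : Int) ' ' = '1'
            ∨ PySem.List.pyGetD (PySem.List.pyGetD lines (y : Int) []) (x : Int) ' ' = ' ') := by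
      intro y hy x hx
      have hylen : y < lines.length := by omega
      have hrow : lines[y] ∈ lines.take N := by
        have : (lines.take N)[y]'(by simp; omega) = lines[y] := List.getElem_take
        rw [← this]; exact List.getElem_mem _
      obtain ⟨hrlen, hrchars⟩ := hrows _ hrow
      have hrlen' : C ≤ lines[y].length := by exact_mod_cast hrlen
      have h1 : PySem.List.pyGetD (lines.map (fun row => PySem.List.slice row none (some (C : Int)))) (y : Int) []
          = lines[y].take C := by
        rw [PySem.List.pyGetD_eq_getElem _ _ (by positivity) (by simpa using (by exact_mod_cast hylen : (y:Int) < (lines.length:Int)))]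
        simp [PySem.List.slice_to _ (by positivity : (0:Int) ≤ (C:Int))]
      have h2 : PySem.List.pyGetD lines (y : Int) [] = lines[y] := by
        rw [PySem.List.pyGetD_eq_getElem _ _ (by positivity) (by exact_mod_cast hylen)]
        simp
      have hxlen : x < (lines[y].take C).length := by simp; omega
      have h3 : PySem.List.pyGetD (lines[y].take C) (x : Int) ' ' = (lines[y].take C)[x] := by
        rw [PySem.List.pyGetD_eq_getElem _ _ (by positivity) (by exact_mod_cast hxlen)]
        simp
      have h4 : PySem.List.pyGetD lines[y] (x : Int) ' ' = lines[y][x]'(by omega) := by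
        rw [PySem.List.pyGetD_eq_getElem _ _ (by positivity) (by exact_mod_cast (by omega : x < lines[y].length))]
        simp
      have h5 : (lines[y].take C)[x] = lines[y][x]'(by omega) := List.getElem_take
      refine ⟨by rw [h1, h2, h3, h4, h5], ?_⟩
      rw [h2, h4, ← h5]
      exact hrchars _ (List.getElem_mem hxlen)
    -- A side: transpose characterization
    rw [pv_outer_loop C N _ N le_rfl]
    -- B side: the appending loop is a map
    rw [PySem.List.foldl_append_singleton_eq_map, List.nil_append,
        PySem.List.pyRange_zero_natCast C, List.map_map]
    rw [List.map_map]
    apply List.map_congr_left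
    intro x hxm
    simp only [List.mem_range] at hxm
    simp only [Function.comp]
    -- simplify the column of A
    have hcol : (List.range N).map (fun (y : Nat) =>
          if y < N then
            PySem.List.pyGetD
              (PySem.List.pyGetD (lines.map (fun row => PySem.List.slice row none (some (C : Int)))) (y : Int) [])
              (x : Int) ' '
          else ' ')
        = (List.range N).map (fun (y : Nat) => PySem.List.pyGetD (PySem.List.pyGetD lines (y : Int) []) (x : Int) ' ') := by
      apply List.map_congr_left
      intro y hym
      simp only [List.mem_range] at hym
      rw [if_pos hym, (hcell y hym x hxm).1]
    rw [hcol, PySem.Chars.join_nil_singletons, pv_replace_space_zero]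
    simp only [List.map_cons]
    rw [show (if '0' = ' ' then '0' else '0') = '0' from rfl,
        show (if 'b' = ' ' then '0' else 'b') = 'b' from rfl]
    -- the parse succeeds and is the bit fold
    rw [show ∀ ds : List Char, pvParseBin0b? ('0' :: 'b' :: ds)
          = if ds ≠ [] ∧ ds.all (fun c => c == '0' || c == '1') then
              some (ds.foldl (fun v c => 2 * v + (if c = '1' then 1 else 0)) 0)
            else none from fun ds => rfl]
    rw [if_pos ?side]
    case side =>
      constructor
      · simp; omega
      · simp only [List.all_map, List.all_eq_true, Function.comp]
        intro y hym
        simp only [List.mem_range] at hym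
        rcases (hcell y hym x hxm).2 with h | h | h <;> rw [h] <;> rfl
    simp only [Option.getD_some, List.foldl_map]
    rw [PySem.List.pyRange_zero_natCast N, List.foldl_map]
    apply PySem.List.foldl_congr_mem
    intro v y hym
    simp only [List.mem_range] at hym
    rcases (hcell y hym x hxm).2 with h | h | h <;> rw [h] <;> rfl

theorem ascii_main (ascii_txt : String) (num_rows num_cols : Int)
    (hpre : Pre_ascii_to_int_columns ascii_txt num_rows num_cols) :
    ascii_to_int_columns ascii_txt num_rows num_cols
      = ascii_to_int_columns_alt ascii_txt num_rows num_cols := by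
  unfold ascii_to_int_columns ascii_to_int_columns_alt
  refine pv_main_core _ _ _ ?_
  have hif : (if num_cols == 0 then num_rows else num_cols)
      = (if num_cols = 0 then num_rows else num_cols) := by
    by_cases h : num_cols = 0 <;> simp [h]
  rw [hif]
  unfold Pre_ascii_to_int_columns at hpre
  simpa [Bool.or_eq_true, Bool.and_eq_true, decide_eq_true_eq, List.all_eq_true, and_assoc,
    or_assoc] using hpre

-- ===== VERDICT (by name: the statement is the Claim_ definition above) =====
theorem ascii_to_int_columns_spec : Claim_equal_ascii_to_int_columns := by
  intro a nr nc _ hpre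
  unfold Spec_ascii_to_int_columns
  exact ascii_main a nr nc hpre
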